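-- pv_equiv track=rewrite | github.com/sj-piano/bitcoin_toolset_python3 | bitcoin_toolset/code/basic.py | count_leading_zero_bytes
-- ===== SOURCE A (Python) =====
-- def count_leading_zero_bytes(x):
--   count = 0
--   for i in range(0, len(x), 2):
--     b = x[i:i+2]  # b = byte
--     if b == '00':
--       count += 1
--     else:
--       break
--   return count
-- ===== SOURCE B (Python) =====
-- def count_leading_zero_bytes(x):
--   return (len(x) - len(x.lstrip('0'))) // 2
-- ===== Notes on version B (the rewrite author's own statement) =====
-- stated objective: simpler
-- what changed: Replaces the explicit byte-pair loop with a closed-form expression: lstrip the leading zero characters, count how many were removed, and floor-divide by 2.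
import Mathlib
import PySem

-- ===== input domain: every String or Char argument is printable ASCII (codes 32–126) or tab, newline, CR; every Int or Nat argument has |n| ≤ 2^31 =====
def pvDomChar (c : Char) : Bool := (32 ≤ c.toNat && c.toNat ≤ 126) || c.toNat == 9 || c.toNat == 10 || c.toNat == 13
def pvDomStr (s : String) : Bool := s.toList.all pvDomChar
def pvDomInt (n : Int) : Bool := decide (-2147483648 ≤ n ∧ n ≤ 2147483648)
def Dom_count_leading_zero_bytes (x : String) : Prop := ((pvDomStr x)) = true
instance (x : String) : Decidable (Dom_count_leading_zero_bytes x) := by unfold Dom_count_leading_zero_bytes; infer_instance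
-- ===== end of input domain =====

-- B replaces A's byte-pair loop with one closed-form expression (stripped leading zeros // 2); objective: simpler.

-- ===== PORT A =====
-- the for-loop over range(0, len(x), 2) with its break, as structural recursion on the range list
def clzbLoop (cs : List Char) : List Int → Int → Int
  | [], count => count
  | i :: rest, count =>
      let b := PySem.List.slice cs (some i) (some (i + 2))  -- b = x[i:i+2]
      if b = ['0', '0'] then clzbLoop cs rest (count + 1) else count

def count_leading_zero_bytes (x : String) : Int :=
  clzbLoop x.toList (PySem.List.pyRange 0 (x.toList.length : Int) 2) 0

-- ===== PORT B =====
-- x.lstrip('0') ported by hand as dropWhile (· == '0') — exact: lstrip('0') removes exactly the leading '0' characters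
def count_leading_zero_bytes_alt (x : String) : Int :=
  let stripped := x.toList.dropWhile (· == '0')
  PySem.Int.floordiv ((x.toList.length : Int) - (stripped.length : Int)) 2

-- ===== PRECONDITION & SPEC =====
def Spec_count_leading_zero_bytes (x : String) (out : Int) : Prop := out = count_leading_zero_bytes_alt x
instance (x : String) (out : Int) : Decidable (Spec_count_leading_zero_bytes x out) := by unfold Spec_count_leading_zero_bytes; infer_instance

-- ===== CLAIM (what is proved, stated in full; the proofs are below) =====
def Claim_equal_count_leading_zero_bytes : Prop := ∀ (x : String), Dom_count_leading_zero_bytes x → Spec_count_leading_zero_bytes x (count_leading_zero_bytes x)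

-- ===== LEMMAS AND PROOFS =====

-- step-2 range as a cons: range(0, n+2, 2) = 0 :: [i+2 for i in range(0, n, 2)]
lemma pyRange_two_cons (n : Nat) :
    PySem.List.pyRange 0 ((n : Int) + 2) 2 = 0 :: (PySem.List.pyRange 0 (n : Int) 2).map (· + 2) := by
  rw [PySem.List.pyRange_of_pos 0 ((n : Int) + 2) (by norm_num),
      PySem.List.pyRange_of_pos 0 (n : Int) (by norm_num)]
  rw [if_pos (show (0 : Int) < (n : Int) + 2 by omega)]
  have h1 : (((n : Int) + 2 - 0 + 2 - 1) / 2).toNat = (n + 1) / 2 + 1 := by omega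
  rw [h1]
  by_cases hn : 0 < n
  · rw [if_pos (show (0 : Int) < (n : Int) by exact_mod_cast hn)]
    have h3 : (((n : Int) - 0 + 2 - 1) / 2).toNat = (n + 1) / 2 := by omega
    rw [h3, List.range_succ_eq_map, List.map_cons, List.map_map]
    congr 1
    rw [List.map_map]
    apply List.map_congr_left; intro k _
    simp only [Function.comp_apply]
    push_cast; ring

  · have hn0 : n = 0 := by omega
    subst hn0
    rw [if_neg (by norm_num)]
    simp

-- every index produced by range(0, n, 2) is nonnegative
lemma pyRange_two_nonneg (n : Nat) : ∀ i ∈ PySem.List.pyRange 0 (n : Int) 2, 0 ≤ i := by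
  intro i hi
  have := (PySem.List.mem_pyRange_iff_of_pos (a := 0) (b := (n : Int)) (by norm_num) i).mp hi
  omega

-- shifting every index by 2 over a list with its first two chars removed changes nothing
lemma clzbLoop_shift (a b : Char) (t : List Char) (r : List Int)
    (hr : ∀ i ∈ r, 0 ≤ i) (count : Int) :
    clzbLoop (a :: b :: t) (r.map (· + 2)) count = clzbLoop t r count := by
  induction r generalizing count with
  | nil => rfl
  | cons i rest ih =>
      have hi : 0 ≤ i := hr i (by simp)
      have hslice : PySem.List.slice (a :: b :: t) (some (i + 2)) (some (i + 2 + 2))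
          = PySem.List.slice t (some i) (some (i + 2)) := by
        rw [PySem.List.slice_toNat _ (by omega) (by omega),
            PySem.List.slice_toNat _ hi (by omega)]
        have h1 : (i + 2).toNat = i.toNat + 2 := by omega
        have h2 : (i + 2 + 2).toNat = i.toNat + 4 := by omega
        simp [h1, h2]
      simp only [List.map_cons, clzbLoop, hslice]
      split
      · exact ih (fun j hj => hr j (by simp [hj])) (count + 1)
      · rfl

-- the loop counts ⌊(number of leading '0' characters)/2⌋
lemma clzbLoop_eq (cs : List Char) (count : Int) :
    clzbLoop cs (PySem.List.pyRange 0 (cs.length : Int) 2) count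
      = count + (((cs.takeWhile (· == '0')).length / 2 : Nat) : Int) := by
  match cs with
  | [] => simp; rfl
  | [c] =>
      have hr : PySem.List.pyRange 0 ((([c] : List Char).length : Int)) 2 = [0] := by
        rw [show ((([c] : List Char).length : Int)) = 1 by simp]
        decide
      rw [hr]
      simp only [clzbLoop]
      have hs : PySem.List.slice [c] (some 0) (some (0 + 2)) = [c] := by
        rw [PySem.List.slice_toNat _ (by omega) (by omega)]; rfl
      rw [hs]
      have hne : ([c] : List Char) ≠ ['0', '0'] := by simp
      simp only [if_neg hne]
      have : (([c].takeWhile (· == '0')).length / 2 : Nat) = 0 := by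
        have : ([c].takeWhile (· == '0')).length ≤ 1 := by
          calc ([c].takeWhile (· == '0')).length ≤ ([c] : List Char).length :=
                (List.takeWhile_sublist _).length_le
            _ = 1 := rfl
        omega
      simp [this]
  | a :: b :: t =>
      have hlen : (((a :: b :: t : List Char).length : Int)) = (t.length : Int) + 2 := by
        simp; omega
      rw [hlen, pyRange_two_cons t.length]
      simp only [clzbLoop]
      have hs : PySem.List.slice (a :: b :: t) (some 0) (some (0 + 2)) = [a, b] := by
        rw [PySem.List.slice_toNat _ (by omega) (by omega)]; rfl
      rw [hs]
      by_cases hab : ([a, b] : List Char) = ['0', '0']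
      · have ha : a = '0' := by simpa using congrArg (·.headI) hab
        have hb : b = '0' := by
          have := List.cons.injEq a [b] '0' ['0'] ▸ hab
          simp at hab; exact hab.2
        simp only [if_pos hab]
        rw [clzbLoop_shift a b t _ (pyRange_two_nonneg t.length) (count + 1),
            clzbLoop_eq t (count + 1)]
        subst ha; subst hb
        have htw : ((('0' :: '0' :: t).takeWhile (· == '0')).length)
            = (t.takeWhile (· == '0')).length + 2 := by
          simp
        rw [htw]
        have : ((t.takeWhile (· == '0')).length + 2) / 2 = (t.takeWhile (· == '0')).length / 2 + 1 := by omega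
        rw [this]
        push_cast
        ring
      · simp only [if_neg hab]
        have : (((a :: b :: t).takeWhile (· == '0')).length / 2 : Nat) = 0 := by
          by_cases ha : a = '0'
          · subst ha
            have hb : b ≠ '0' := by intro h; subst h; exact hab rfl
            have : (('0' :: b :: t).takeWhile (· == '0')).length = 1 := by
              simp [hb]
            omega
          · have ha' : (a == '0') = false := by simp [ha]
            have : ((a :: b :: t).takeWhile (· == '0')).length = 0 := by
              rw [List.takeWhile_cons, ha']; rfl
            omega
        simp [this]

-- length of dropWhile complement: what lstrip removes is the takeWhile prefix
lemma len_sub_dropWhile (cs : List Char) :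
    (cs.length : Int) - ((cs.dropWhile (· == '0')).length : Int)
      = ((cs.takeWhile (· == '0')).length : Int) := by
  have h := congrArg List.length (List.takeWhile_append_dropWhile (p := (· == '0')) (l := cs))
  rw [List.length_append] at h
  omega

-- ===== VERDICT (by name: the statement is the Claim_ definition above) =====
theorem count_leading_zero_bytes_spec : Claim_equal_count_leading_zero_bytes := by
  intro x _
  unfold Spec_count_leading_zero_bytes count_leading_zero_bytes
  simp only [count_leading_zero_bytes_alt]
  rw [clzbLoop_eq, len_sub_dropWhile]
  rw [PySem.Int.floordiv_eq_ediv_of_pos (by norm_num : (0:Int) < 2)]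
  omega
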